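-- pv_equiv track=rewrite | github.com/knachiketa04/gcs-cost-simulator | gcs-cost-simulator-app/simulation.py | optimize_generations
-- ===== SOURCE A (Python) =====
-- def optimize_generations(generations, max_generations=150):
--     """Smart merging that preserves age accuracy while reducing generation count"""
--     if len(generations) <= max_generations:
--         return generations
--
--     # Sort by size and keep largest generations intact
--     generations.sort(key=lambda x: x["size"], reverse=True)
--     large_generations = generations[:100]  # Keep 100 largest
--     small_generations = generations[100:]   # Merge the rest
--
--     # Group small generations by their natural storage tier based on age
--     tier_groups = {
--         "standard": [],    # age < 30 days
--         "nearline": [],    # 30 <= age < 90 days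
--         "coldline": [],    # 90 <= age < 365 days
--         "archive": []      # age >= 365 days
--     }
--
--     for gen in small_generations:
--         age = gen["age_days"]
--         if age >= 365:
--             tier_groups["archive"].append(gen)
--         elif age >= 90:
--             tier_groups["coldline"].append(gen)
--         elif age >= 30:
--             tier_groups["nearline"].append(gen)
--         else:
--             tier_groups["standard"].append(gen)
--
--     # Merge within each tier, preserving age accuracy
--     for tier, tier_gens in tier_groups.items():
--         if tier_gens:
--             merged_size = sum(g["size"] for g in tier_gens)
--             merged_objects = sum(g["objects"] for g in tier_gens)
--             # Preserve the maximum age within the tier (most conservative)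
--             max_age = max(g["age_days"] for g in tier_gens)
--             # Use the earliest creation month for tracking
--             earliest_month = min(g["created_month"] for g in tier_gens)
--
--             if merged_size > 0:
--                 large_generations.append({
--                     "size": merged_size,
--                     "age_days": max_age,  # Preserve actual age, not forced!
--                     "objects": merged_objects,
--                     "created_month": earliest_month
--                 })
--
--     return large_generations
-- ===== SOURCE B (Python) =====
-- def optimize_generations(generations, max_generations=150):
--     """Single-pass merge: fold small generations directly into per-tier accumulators."""
--     if len(generations) <= max_generations:
--         return generations
--
--     generations.sort(key=lambda x: x["size"], reverse=True)
--     large_generations = generations[:100]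
--
--     # per-tier online accumulators: [seen, size, objects, max_age, min_month]
--     acc = {t: [False, 0, 0, 0, 0] for t in ("standard", "nearline", "coldline", "archive")}
--     for gen in generations[100:]:
--         age = gen["age_days"]
--         if age >= 365:
--             a = acc["archive"]
--         elif age >= 90:
--             a = acc["coldline"]
--         elif age >= 30:
--             a = acc["nearline"]
--         else:
--             a = acc["standard"]
--         a[1] += gen["size"]
--         a[2] += gen["objects"]
--         if a[0]:
--             a[3] = max(a[3], age)
--             a[4] = min(a[4], gen["created_month"])
--         else:
--             a[3] = age
--             a[4] = gen["created_month"]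
--             a[0] = True
--
--     for tier in ("standard", "nearline", "coldline", "archive"):
--         seen, size, objects, max_age, min_month = acc[tier]
--         if seen and size > 0:
--             large_generations.append({
--                 "size": size,
--                 "age_days": max_age,
--                 "objects": objects,
--                 "created_month": min_month
--             })
--     return large_generations
-- ===== Notes on version B (the rewrite author's own statement) =====
-- stated objective: alternative
-- what changed: Replaces A's partition-into-per-tier-lists followed by per-tier sum/max/min reductions with a single pass over the small generations that folds each generation's fields directly into per-tier running accumulators (sum, sum, max, min, seen flag), then emits the merged dicts in fixed tier order.
import Mathlib
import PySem

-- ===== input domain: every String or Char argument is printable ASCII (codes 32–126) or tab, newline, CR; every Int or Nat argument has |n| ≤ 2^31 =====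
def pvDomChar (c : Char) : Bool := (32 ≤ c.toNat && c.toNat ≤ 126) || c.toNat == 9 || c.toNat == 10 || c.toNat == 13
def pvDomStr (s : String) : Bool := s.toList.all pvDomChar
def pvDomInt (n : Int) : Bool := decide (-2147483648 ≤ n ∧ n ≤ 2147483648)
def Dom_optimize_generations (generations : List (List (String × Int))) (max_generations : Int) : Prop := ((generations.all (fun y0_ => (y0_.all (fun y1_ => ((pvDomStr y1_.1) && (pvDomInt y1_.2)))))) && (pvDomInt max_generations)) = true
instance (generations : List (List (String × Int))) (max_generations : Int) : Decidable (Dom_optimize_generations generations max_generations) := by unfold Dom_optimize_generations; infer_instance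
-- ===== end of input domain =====

-- B replaces A's partition-into-tier-lists + per-tier reductions by one online accumulation pass
-- (same cost class; objective: alternative decomposition). Both programs sort the argument list
-- in place in Python; the equivalence proved here is about the RETURN value (B performs the same mutation).

-- ===== PORT A =====
-- gen["k"]: first-match association-list lookup; the default 0 is never reached under
-- Pre_ (Python raises KeyError there).
def pvGetK (g : List (String × Int)) (k : String) : Int :=
  match g.find? (fun p => p.1 == k) with
  | some p => p.2
  | none => 0

-- one step of A's tier-grouping loop: append gen to its tier list (standard, nearline, coldline, archive)
def pvStepA (st : List (List (String × Int)) × List (List (String × Int)) × List (List (String × Int)) × List (List (String × Int)))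
    (g : List (String × Int)) :
    List (List (String × Int)) × List (List (String × Int)) × List (List (String × Int)) × List (List (String × Int)) :=
  if pvGetK g "age_days" ≥ 365 then (st.1, st.2.1, st.2.2.1, st.2.2.2 ++ [g])
  else if pvGetK g "age_days" ≥ 90 then (st.1, st.2.1, st.2.2.1 ++ [g], st.2.2.2)
  else if pvGetK g "age_days" ≥ 30 then (st.1, st.2.1 ++ [g], st.2.2.1, st.2.2.2)
  else (st.1 ++ [g], st.2.1, st.2.2.1, st.2.2.2)

-- A's per-tier merge: sum() ported as a left fold from 0, max()/min() over a nonempty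
-- list as a left fold from the first element (exact for Python on ints).
def pvMergeA (acc : List (List (String × Int))) (tg : List (List (String × Int))) : List (List (String × Int)) :=
  match tg with
  | [] => acc
  | h :: t =>
    let ms := (h :: t).foldl (fun s g => s + pvGetK g "size") 0
    let mo := (h :: t).foldl (fun s g => s + pvGetK g "objects") 0
    let ma := t.foldl (fun m g => max m (pvGetK g "age_days")) (pvGetK h "age_days")
    let em := t.foldl (fun m g => min m (pvGetK g "created_month")) (pvGetK h "created_month")
    if ms > 0 then
      acc ++ [[("size", ms), ("age_days", ma), ("objects", mo), ("created_month", em)]]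
    else acc

def optimize_generations (generations : List (List (String × Int))) (max_generations : Int) : List (List (String × Int)) :=
  if (generations.length : Int) ≤ max_generations then generations
  else
    let sortedG := PySem.List.sorted generations (fun g => pvGetK g "size") true
    let large := sortedG.take 100   -- [:100], nonnegative literal bound: exact as take
    let small := sortedG.drop 100   -- [100:]
    let tg := small.foldl pvStepA ([], [], [], [])
    pvMergeA (pvMergeA (pvMergeA (pvMergeA large tg.1) tg.2.1) tg.2.2.1) tg.2.2.2

-- ===== PORT B =====
-- per-tier accumulator (seen, size, objects, max_age, min_month); one B loop step on it
def pvStepB (a : Bool × Int × Int × Int × Int) (g : List (String × Int)) (age : Int) :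
    Bool × Int × Int × Int × Int :=
  if a.1 then (true, a.2.1 + pvGetK g "size", a.2.2.1 + pvGetK g "objects",
      max a.2.2.2.1 age, min a.2.2.2.2 (pvGetK g "created_month"))
  else (true, a.2.1 + pvGetK g "size", a.2.2.1 + pvGetK g "objects", age, pvGetK g "created_month")

-- B's single-pass step: route gen to its tier's accumulator
def pvStep4B (st : (Bool × Int × Int × Int × Int) × (Bool × Int × Int × Int × Int) × (Bool × Int × Int × Int × Int) × (Bool × Int × Int × Int × Int))
    (g : List (String × Int)) :
    (Bool × Int × Int × Int × Int) × (Bool × Int × Int × Int × Int) × (Bool × Int × Int × Int × Int) × (Bool × Int × Int × Int × Int) :=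
  if pvGetK g "age_days" ≥ 365 then (st.1, st.2.1, st.2.2.1, pvStepB st.2.2.2 g (pvGetK g "age_days"))
  else if pvGetK g "age_days" ≥ 90 then (st.1, st.2.1, pvStepB st.2.2.1 g (pvGetK g "age_days"), st.2.2.2)
  else if pvGetK g "age_days" ≥ 30 then (st.1, pvStepB st.2.1 g (pvGetK g "age_days"), st.2.2.1, st.2.2.2)
  else (pvStepB st.1 g (pvGetK g "age_days"), st.2.1, st.2.2.1, st.2.2.2)

def pvEmitB (a : Bool × Int × Int × Int × Int) : List (List (String × Int)) :=
  if a.1 && a.2.1 > 0 then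
    [[("size", a.2.1), ("age_days", a.2.2.2.1), ("objects", a.2.2.1), ("created_month", a.2.2.2.2)]]
  else []

def optimize_generations_alt (generations : List (List (String × Int))) (max_generations : Int) : List (List (String × Int)) :=
  if (generations.length : Int) ≤ max_generations then generations
  else
    let sortedG := PySem.List.sorted generations (fun g => pvGetK g "size") true
    let large := sortedG.take 100
    let a := (sortedG.drop 100).foldl pvStep4B
      ((false, 0, 0, 0, 0), (false, 0, 0, 0, 0), (false, 0, 0, 0, 0), (false, 0, 0, 0, 0))
    large ++ pvEmitB a.1 ++ pvEmitB a.2.1 ++ pvEmitB a.2.2.1 ++ pvEmitB a.2.2.2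

-- ===== PRECONDITION & SPEC =====
-- Pre_ excludes exactly the inputs where Python A raises KeyError: more generations than
-- max_generations while some generation lacks one of the four required keys.
def Pre_optimize_generations (generations : List (List (String × Int))) (max_generations : Int) : Prop :=
  (generations.length : Int) ≤ max_generations ∨
    ∀ g ∈ generations,
      "size" ∈ g.map Prod.fst ∧ "age_days" ∈ g.map Prod.fst ∧
      "objects" ∈ g.map Prod.fst ∧ "created_month" ∈ g.map Prod.fst
instance (generations : List (List (String × Int))) (max_generations : Int) : Decidable (Pre_optimize_generations generations max_generations) := by unfold Pre_optimize_generations; infer_instance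

def pvWitness_optimize_generations : (List (List (String × Int))) × Int :=
  ([[("size", 3), ("age_days", 40), ("objects", 1), ("created_month", 2)]], 5)

def Spec_optimize_generations (generations : List (List (String × Int))) (max_generations : Int) (out : List (List (String × Int))) : Prop := out = optimize_generations_alt generations max_generations
instance (generations : List (List (String × Int))) (max_generations : Int) (out : List (List (String × Int))) : Decidable (Spec_optimize_generations generations max_generations out) := by unfold Spec_optimize_generations; infer_instance

-- ===== CLAIM (what is proved, stated in full; the proofs are below) =====
def Claim_equal_optimize_generations : Prop := ∀ (generations : List (List (String × Int))) (max_generations : Int), Dom_optimize_generations generations max_generations → Pre_optimize_generations generations max_generations → Spec_optimize_generations generations max_generations (optimize_generations generations max_generations)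

-- ===== LEMMAS AND PROOFS =====

-- tier index of a generation (3 = archive, 2 = coldline, 1 = nearline, 0 = standard)
def pvTierIdx (g : List (String × Int)) : Nat :=
  if pvGetK g "age_days" ≥ 365 then 3
  else if pvGetK g "age_days" ≥ 90 then 2
  else if pvGetK g "age_days" ≥ 30 then 1 else 0

def pvFoldT (tg : List (List (String × Int))) (s : Bool × Int × Int × Int × Int) :
    Bool × Int × Int × Int × Int :=
  tg.foldl (fun a g => pvStepB a g (pvGetK g "age_days")) s

set_option maxHeartbeats 1000000 in
theorem pvFoldA_filter (l : List (List (String × Int)))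
    (a0 a1 a2 a3 : List (List (String × Int))) :
    l.foldl pvStepA (a0, a1, a2, a3) =
      (a0 ++ l.filter (fun g => pvTierIdx g == 0),
       a1 ++ l.filter (fun g => pvTierIdx g == 1),
       a2 ++ l.filter (fun g => pvTierIdx g == 2),
       a3 ++ l.filter (fun g => pvTierIdx g == 3)) := by
  induction l generalizing a0 a1 a2 a3 with
  | nil => simp
  | cons h t ih =>
    simp only [List.foldl_cons]
    by_cases h1 : pvGetK h "age_days" ≥ 365
    · have e : pvStepA (a0, a1, a2, a3) h = (a0, a1, a2, a3 ++ [h]) := by simp [pvStepA, h1]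
      have ht : pvTierIdx h = 3 := by simp [pvTierIdx, h1]
      rw [e, ih]; simp [ht]
    · by_cases h2 : pvGetK h "age_days" ≥ 90
      · have e : pvStepA (a0, a1, a2, a3) h = (a0, a1, a2 ++ [h], a3) := by
          simp [pvStepA, h1, h2]
        have ht : pvTierIdx h = 2 := by simp [pvTierIdx, h1, h2]
        rw [e, ih]; simp [ht]
      · by_cases h3 : pvGetK h "age_days" ≥ 30
        · have e : pvStepA (a0, a1, a2, a3) h = (a0, a1 ++ [h], a2, a3) := by
            simp [pvStepA, h1, h2, h3]
          have ht : pvTierIdx h = 1 := by simp [pvTierIdx, h1, h2, h3]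
          rw [e, ih]; simp [ht]
        · have e : pvStepA (a0, a1, a2, a3) h = (a0 ++ [h], a1, a2, a3) := by
            simp [pvStepA, h1, h2, h3]
          have ht : pvTierIdx h = 0 := by simp [pvTierIdx, h1, h2, h3]
          rw [e, ih]; simp [ht]

set_option maxHeartbeats 1000000 in
theorem pvFoldB_filter (l : List (List (String × Int)))
    (s0 s1 s2 s3 : Bool × Int × Int × Int × Int) :
    l.foldl pvStep4B (s0, s1, s2, s3) =
      (pvFoldT (l.filter (fun g => pvTierIdx g == 0)) s0,
       pvFoldT (l.filter (fun g => pvTierIdx g == 1)) s1,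
       pvFoldT (l.filter (fun g => pvTierIdx g == 2)) s2,
       pvFoldT (l.filter (fun g => pvTierIdx g == 3)) s3) := by
  induction l generalizing s0 s1 s2 s3 with
  | nil => simp [pvFoldT]
  | cons h t ih =>
    simp only [List.foldl_cons]
    by_cases h1 : pvGetK h "age_days" ≥ 365
    · have e : pvStep4B (s0, s1, s2, s3) h = (s0, s1, s2, pvStepB s3 h (pvGetK h "age_days")) := by
        simp [pvStep4B, h1]
      have ht : pvTierIdx h = 3 := by simp [pvTierIdx, h1]
      rw [e, ih]; simp [ht, pvFoldT]
    · by_cases h2 : pvGetK h "age_days" ≥ 90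
      · have e : pvStep4B (s0, s1, s2, s3) h = (s0, s1, pvStepB s2 h (pvGetK h "age_days"), s3) := by
          simp [pvStep4B, h1, h2]
        have ht : pvTierIdx h = 2 := by simp [pvTierIdx, h1, h2]
        rw [e, ih]; simp [ht, pvFoldT]
      · by_cases h3 : pvGetK h "age_days" ≥ 30
        · have e : pvStep4B (s0, s1, s2, s3) h = (s0, pvStepB s1 h (pvGetK h "age_days"), s2, s3) := by
            simp [pvStep4B, h1, h2, h3]
          have ht : pvTierIdx h = 1 := by simp [pvTierIdx, h1, h2, h3]
          rw [e, ih]; simp [ht, pvFoldT]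
        · have e : pvStep4B (s0, s1, s2, s3) h = (pvStepB s0 h (pvGetK h "age_days"), s1, s2, s3) := by
            simp [pvStep4B, h1, h2, h3]
          have ht : pvTierIdx h = 0 := by simp [pvTierIdx, h1, h2, h3]
          rw [e, ih]; simp [ht, pvFoldT]

theorem pvFoldT_seen (l : List (List (String × Int))) (a b c d : Int) :
    pvFoldT l (true, a, b, c, d) =
      (true,
       l.foldl (fun s g => s + pvGetK g "size") a,
       l.foldl (fun s g => s + pvGetK g "objects") b,
       l.foldl (fun m g => max m (pvGetK g "age_days")) c,
       l.foldl (fun m g => min m (pvGetK g "created_month")) d) := by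
  induction l generalizing a b c d with
  | nil => simp [pvFoldT]
  | cons h t ih =>
    have hs : pvFoldT (h :: t) (true, a, b, c, d) =
        pvFoldT t (true, a + pvGetK h "size", b + pvGetK h "objects",
          max c (pvGetK h "age_days"), min d (pvGetK h "created_month")) := by
      simp [pvFoldT, pvStepB]
    rw [hs, ih]; simp

theorem pvMergeA_emit (acc : List (List (String × Int))) (tg : List (List (String × Int))) :
    pvMergeA acc tg = acc ++ pvEmitB (pvFoldT tg (false, 0, 0, 0, 0)) := by
  cases tg with
  | nil => simp [pvMergeA, pvFoldT, pvEmitB]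
  | cons h t =>
    have hs : pvFoldT (h :: t) (false, 0, 0, 0, 0) =
        pvFoldT t (true, 0 + pvGetK h "size", 0 + pvGetK h "objects",
          pvGetK h "age_days", pvGetK h "created_month") := by
      simp [pvFoldT, pvStepB]
    rw [hs, pvFoldT_seen]
    simp only [pvMergeA, List.foldl_cons, pvEmitB]
    split_ifs <;> simp_all <;> omega

-- ===== VERDICT (by name: the statement is the Claim_ definition above) =====
theorem optimize_generations_spec : Claim_equal_optimize_generations := by
  intro generations max_generations _hdom _hpre
  unfold Spec_optimize_generations optimize_generations optimize_generations_alt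
  by_cases hle : (generations.length : Int) ≤ max_generations
  · simp [hle]
  · simp only [hle, if_false]
    rw [pvFoldA_filter, pvFoldB_filter]
    simp only [pvMergeA_emit, List.nil_append, List.append_assoc]
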